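-- pv_equiv track=rewrite | github.com/rani-ukamble/python_coding | a41.py | max_freq_word
-- ===== SOURCE A (Python) =====
-- from collections import Counter
--
-- def max_freq_word(s):
--     s = s.split()
--     word_freq = Counter(s)
--
--     max_word = ""
--     max_freq = 0
--     for word, freq in word_freq.items():
--         if (freq > max_freq) or (freq == max_freq and len(word)>len(max_word)):
--             max_word = word
--             max_freq = freq
--
--     return max_word, max_freq
-- ===== SOURCE B (Python) =====
-- from collections import Counter
--
-- def max_freq_word(s):
--     items = list(Counter(s.split()).items())
--     items.sort(key=lambda kv: (-kv[1], -len(kv[0])))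
--     if not items:
--         return "", 0
--     return items[0]
-- ===== Notes on version B (the rewrite author's own statement) =====
-- stated objective: alternative
-- what changed: B replaces A's manual best-so-far scanning loop over Counter items with a stable sort by key (-freq, -len(word)) and takes the first item, with an explicit ('', 0) result for empty input.
import Mathlib
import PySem

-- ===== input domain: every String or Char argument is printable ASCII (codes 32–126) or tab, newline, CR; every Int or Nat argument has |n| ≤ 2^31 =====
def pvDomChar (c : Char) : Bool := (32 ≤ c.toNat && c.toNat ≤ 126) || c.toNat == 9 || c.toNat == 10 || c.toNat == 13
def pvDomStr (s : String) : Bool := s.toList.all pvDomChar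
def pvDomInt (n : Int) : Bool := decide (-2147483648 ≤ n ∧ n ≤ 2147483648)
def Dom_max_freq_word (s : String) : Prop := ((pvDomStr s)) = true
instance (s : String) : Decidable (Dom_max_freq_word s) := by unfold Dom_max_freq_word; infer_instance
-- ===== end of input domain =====

-- B sorts the Counter's items stably by key (-freq, -len(word)) and takes the first,
-- instead of A's manual best-so-far scanning loop; same results everywhere.


-- ===== PORT A =====
def max_freq_word (s : String) : String × Int :=
  let words := PySem.Str.split₀ s
  let word_freq := PySem.Dict.counter words
  let r := word_freq.items.foldl
    (fun (m : String × Int) (wf : String × Int) =>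
      if wf.2 > m.2 ∨ (wf.2 = m.2 ∧ PySem.Str.len wf.1 > PySem.Str.len m.1) then wf else m)
    ("", 0)
  r

-- ===== PORT B =====
def max_freq_word_alt (s : String) : String × Int :=
  let items := (PySem.Dict.counter (PySem.Str.split₀ s)).items
  let sorted := PySem.List.sorted2 items (fun kv => -kv.2) (fun kv => -(PySem.Str.len kv.1))
  match sorted with
  | [] => ("", 0)
  | kv :: _ => kv

-- ===== PRECONDITION & SPEC =====
def Spec_max_freq_word (s : String) (out : String × Int) : Prop := out = max_freq_word_alt s
instance (s : String) (out : String × Int) : Decidable (Spec_max_freq_word s out) := by unfold Spec_max_freq_word; infer_instance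

-- ===== CLAIM (what is proved, stated in full; the proofs are below) =====
def Claim_equal_max_freq_word : Prop := ∀ (s : String), Dom_max_freq_word s → Spec_max_freq_word s (max_freq_word s)

-- ===== LEMMAS AND PROOFS =====

-- the head-update of one insertion step
def optStep {α : Type} (before : α → α → Bool) (o : Option α) (x : α) : Option α :=
  match o with
  | none => some x
  | some y => some (if before x y then x else y)

-- head of an insertBy step
theorem head?_insertBy {α : Type} (before : α → α → Bool) (x : α) (ys : List α) :
    (PySem.List.insertBy before x ys).head? = optStep before ys.head? x := by
  cases ys <;> simp [PySem.List.insertBy, optStep]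
  split <;> simp

-- head of the insertion-sort foldl is the strict-improvement scan
theorem head?_foldl_insertBy {α : Type} (before : α → α → Bool) (l : List α) (acc : List α) :
    (l.foldl (fun acc x => PySem.List.insertBy before x acc) acc).head? =
      l.foldl (optStep before) acc.head? := by
  induction l generalizing acc with
  | nil => rfl
  | cons x t ih => simp only [List.foldl_cons, ih, head?_insertBy]

-- the comparison used by B's sort key (-freq, -len(word)), as a Boolean
def pvBefore (a b : String × Int) : Bool :=
  decide ((-a.2 : Int) < -b.2) ||
    (!decide ((-b.2 : Int) < -a.2) && decide ((-(PySem.Str.len a.1) : Int) < -(PySem.Str.len b.1)))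

theorem pvBefore_iff (x m : String × Int) :
    pvBefore x m = true ↔ (x.2 > m.2 ∨ (x.2 = m.2 ∧ PySem.Str.len x.1 > PySem.Str.len m.1)) := by
  simp [pvBefore]
  omega

-- A's scan from state m equals the option-level strict-improvement scan
theorem scan_eq (d : String × Int) (t : List (String × Int)) : ∀ (m : String × Int),
    t.foldl (fun (m wf : String × Int) =>
        if wf.2 > m.2 ∨ (wf.2 = m.2 ∧ PySem.Str.len wf.1 > PySem.Str.len m.1) then wf else m) m
      = (t.foldl (optStep pvBefore) (some m)).getD d := by
  induction t with
  | nil => intro m; rfl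
  | cons x t ih =>
    intro m
    simp only [List.foldl_cons]
    rw [ih]
    simp only [optStep]
    congr 2
    by_cases h : (x.2 > m.2 ∨ (x.2 = m.2 ∧ PySem.Str.len x.1 > PySem.Str.len m.1))
    · rw [if_pos h, if_pos ((pvBefore_iff x m).mpr h)]
    · rw [if_neg h, if_neg (fun hb => h ((pvBefore_iff x m).mp hb))]

-- every count in Counter(xs).items is at least 1
theorem items_counter_pos (xs : List String) : ∀ p ∈ (PySem.Dict.counter xs).items, 1 ≤ p.2 := by
  rw [PySem.Dict.items_counter]
  intro p hp
  simp only [List.mem_map] at hp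
  obtain ⟨k, hk, rfl⟩ := hp
  have hmem : k ∈ xs := (PySem.Set.mem_ofList xs k).mp hk
  simpa using List.count_pos_iff.mpr hmem

theorem key_lemma (l : List (String × Int)) (hpos : ∀ p ∈ l, 1 ≤ p.2) :
    l.foldl (fun (m wf : String × Int) =>
        if wf.2 > m.2 ∨ (wf.2 = m.2 ∧ PySem.Str.len wf.1 > PySem.Str.len m.1) then wf else m) ("", 0)
      = ((PySem.List.sorted2 l (fun kv => -kv.2) (fun kv => -(PySem.Str.len kv.1))).head?).getD ("", 0) := by
  have hs : PySem.List.sorted2 l (fun kv : String × Int => -kv.2) (fun kv => -(PySem.Str.len kv.1))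
      = l.foldl (fun acc x => PySem.List.insertBy pvBefore x acc) [] := rfl
  cases l with
  | nil => rfl
  | cons p t =>
    rw [hs]
    simp only [List.foldl_cons]
    have h1 : PySem.List.insertBy pvBefore p [] = [p] := rfl
    rw [h1, head?_foldl_insertBy, List.head?_cons]
    have hp : p.2 > 0 := by have := hpos p (List.mem_cons_self ..); omega
    rw [if_pos (Or.inl hp)]
    exact scan_eq ("", 0) t p

theorem alt_eq (s : String) : max_freq_word_alt s =
    ((PySem.List.sorted2 ((PySem.Dict.counter (PySem.Str.split₀ s)).items)
        (fun kv => -kv.2) (fun kv => -(PySem.Str.len kv.1))).head?).getD ("", 0) := by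
  cases hq : PySem.List.sorted2 ((PySem.Dict.counter (PySem.Str.split₀ s)).items)
      (fun kv => -kv.2) (fun kv => -(PySem.Str.len kv.1)) with
  | nil => simp only [max_freq_word_alt]; rw [hq]; rfl
  | cons kv t => simp only [max_freq_word_alt]; rw [hq]; rfl

-- ===== VERDICT (by name: the statement is the Claim_ definition above) =====
theorem max_freq_word_spec : Claim_equal_max_freq_word := by
  intro s hd
  unfold Spec_max_freq_word
  rw [alt_eq]
  simp only [max_freq_word]
  exact key_lemma _ (items_counter_pos _)
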